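-- pv_equiv track=rewrite | github.com/KuyaJimbo/CodeWiz_Mini_Projects | Python Project/Text-Based Python/gambling.py | onePair
-- ===== SOURCE A (Python) =====
-- def onePair(cards):
--     rank_count = {}
--     for card in cards:
--         rank = card[1]
--         if rank in rank_count:
--             rank_count[rank] += 1
--         else:
--             rank_count[rank] = 1
--     pairs = 0
--     for count in rank_count.values():
--         if count == 2:
--             pairs += 1
--     return pairs == 1
-- ===== SOURCE B (Python) =====
-- def onePair(cards):
--     ranks = sorted(card[1] for card in cards)
--
--     def pairs_in(rs):
--         # rs is sorted: equal ranks are contiguous; count runs of length exactly 2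
--         if not rs:
--             return 0
--         k = 0
--         while k < len(rs) - 1 and rs[1 + k] == rs[0]:
--             k += 1
--         return (1 if 1 + k == 2 else 0) + pairs_in(rs[1 + k:])
--
--     return pairs_in(ranks) == 1
-- ===== Notes on version B (the rewrite author's own statement) =====
-- stated objective: alternative
-- what changed: Replaces the hash frequency table and its value scan by sorting the ranks and recursively scanning consecutive runs of equal ranks, counting the runs of length exactly two.
import Mathlib
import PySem

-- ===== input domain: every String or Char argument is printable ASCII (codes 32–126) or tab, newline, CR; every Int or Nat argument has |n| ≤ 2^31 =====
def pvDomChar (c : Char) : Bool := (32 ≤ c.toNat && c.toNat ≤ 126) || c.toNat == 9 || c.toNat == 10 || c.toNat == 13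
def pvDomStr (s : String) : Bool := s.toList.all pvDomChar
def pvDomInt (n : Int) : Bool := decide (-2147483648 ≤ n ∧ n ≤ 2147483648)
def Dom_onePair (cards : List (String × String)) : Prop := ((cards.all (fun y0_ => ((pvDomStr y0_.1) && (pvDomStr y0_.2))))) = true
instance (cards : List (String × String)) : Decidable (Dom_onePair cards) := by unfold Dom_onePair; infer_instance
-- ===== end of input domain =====

-- B replaces A's hash frequency table and value scan by a sort followed by a
-- recursive scan over runs of equal ranks, counting runs of length exactly 2
-- (a different algorithm of similar cost; no speed claim).

-- ===== PORT A =====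
def onePair (cards : List (String × String)) : Bool :=
  let rank_count := cards.foldl (fun d card =>
    let rank := card.2
    if d.contains rank then d.insert rank (d.getD rank 0 + 1)
    else d.insert rank (1 : Int)) (PySem.Dict.empty)
  let pairs := rank_count.values.foldl (fun p c => if c = 2 then p + 1 else p) (0 : Int)
  decide (pairs = 1)

-- ===== PORT B =====
-- inner helper pairs_in: the while loop counting how many elements of the tail
-- equal the head is ported as the length of takeWhile; rs[1+k:] is t.drop k.
def pairsIn : List String → Int
  | [] => 0
  | a :: t =>
    let k := (t.takeWhile (· == a)).length
    (if (1 + (k : Int)) = 2 then 1 else 0) + pairsIn (t.drop k)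
termination_by l => l.length
decreasing_by simp

def onePair_alt (cards : List (String × String)) : Bool :=
  let ranks := PySem.List.sorted (cards.map (·.2)) (fun x => x)
  decide (pairsIn ranks = 1)

-- ===== PRECONDITION & SPEC =====
def Spec_onePair (cards : List (String × String)) (out : Bool) : Prop := out = onePair_alt cards
instance (cards : List (String × String)) (out : Bool) : Decidable (Spec_onePair cards out) := by unfold Spec_onePair; infer_instance

-- ===== CLAIM (what is proved, stated in full; the proofs are below) =====
def Claim_equal_onePair : Prop := ∀ (cards : List (String × String)), Dom_onePair cards → Spec_onePair cards (onePair cards)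

-- ===== LEMMAS AND PROOFS =====

-- A's increment-or-initialise step is exactly the counter step (in the miss branch getD is 0).
lemma onePair_step_eq :
    (fun (d : PySem.Dict String Int) (x : String) =>
      if d.contains x then d.insert x (d.getD x 0 + 1) else d.insert x (1 : Int))
    = fun d x => d.insert x (d.getD x 0 + 1) := by
  funext d x
  by_cases h : d.contains x
  · simp [h]
  · rw [if_neg h, PySem.Dict.getD_of_not_contains (h := by simpa using h)]
    norm_num

-- A's dict after the first loop is Counter(ranks).
lemma onePair_dict_eq (cards : List (String × String)) :
    cards.foldl (fun d card =>
      let rank := card.2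
      if d.contains rank then d.insert rank (d.getD rank 0 + 1)
      else d.insert rank (1 : Int)) PySem.Dict.empty
    = PySem.Dict.counter (cards.map (·.2)) := by
  rw [← PySem.Dict.foldl_insert_getD_add_one_eq_counter, List.foldl_map]
  exact congrFun (congrFun (congrArg _ (funext fun d => funext fun c =>
    congrFun (congrFun onePair_step_eq d) (c : String × String).2)) _) _

-- Counter(ranks).values lists, per distinct rank, its multiplicity in ranks.
lemma counter_values_eq (l : List String) :
    (PySem.Dict.counter l).values = (PySem.Set.ofList l).map (fun k => ((l.count k : Int))) := by
  rw [PySem.Dict.values_eq_map_keys _ (PySem.Dict.nodup_keys_counter l) 0, PySem.Dict.keys_counter]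
  exact List.map_congr_left (fun k _ => PySem.Dict.getD_counter l k)

-- A's pair tally is the number of distinct ranks occurring exactly twice.
lemma onePair_eq_countP (cards : List (String × String)) :
    onePair cards
      = decide ((((PySem.Set.ofList (cards.map (·.2))).countP
          (fun r => decide ((cards.map (·.2)).count r = 2)) : Nat) : Int) = 1) := by
  unfold onePair
  dsimp only
  rw [onePair_dict_eq, counter_values_eq,
    PySem.List.foldl_ite_add_one (fun c => c = 2)]
  simp only [List.countP_map, Function.comp_def, zero_add]
  congr 2
  exact_mod_cast List.countP_congr (fun x _ => by simp)

-- dropping the matched prefix is dropWhile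
lemma drop_len_takeWhile (t : List String) (p : String → Bool) :
    t.drop (t.takeWhile p).length = t.dropWhile p := by
  induction t with
  | nil => simp
  | cons b r ih =>
    by_cases h : p b
    · simp [h, ih]
    · simp [h]

-- the matched prefix is a block of copies of the head
lemma takeWhile_beq_replicate (t : List String) (a : String) :
    t.takeWhile (· == a) = List.replicate (t.takeWhile (· == a)).length a := by
  rw [List.eq_replicate_iff]
  exact ⟨rfl, fun b hb => by simpa using List.mem_takeWhile_imp hb⟩

-- in a sorted tail all of whose elements dominate a, a does not reappear after its run
lemma not_mem_dropWhile (a : String) (t : List String)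
    (hp : t.Pairwise (· ≤ ·)) (hle : ∀ x ∈ t, a ≤ x) :
    a ∉ t.dropWhile (· == a) := by
  induction t with
  | nil => simp
  | cons b r ih =>
    by_cases hb : (b == a)
    · simp only [List.dropWhile_cons, hb, if_pos]
      exact ih hp.of_cons (fun x hx => hle x (List.mem_cons_of_mem b hx))
    · simp only [List.dropWhile_cons, hb, if_neg, Bool.false_eq_true, not_false_iff]
      have hab : a < b :=
        lt_of_le_of_ne (hle b (List.mem_cons_self)) (fun h => hb (by simp [h.symm]))
      intro hmem
      rcases List.mem_cons.mp hmem with h | h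
      · exact ne_of_lt hab h
      · exact absurd (lt_of_lt_of_le hab ((List.pairwise_cons.mp hp).1 a h)) (lt_irrefl a)

-- the matched prefix counts only copies of the head
lemma count_takeWhile_beq (t : List String) (a x : String) :
    (t.takeWhile (· == a)).count x
      = if x = a then (t.takeWhile (· == a)).length else 0 := by
  rw [takeWhile_beq_replicate, List.count_replicate]
  rcases eq_or_ne x a with h | h
  · subst h; simp
  · simp [h, Ne.symm h]

-- the run scan over a sorted list counts the distinct elements of multiplicity 2
lemma pairsIn_sorted_aux (n : Nat) : ∀ s : List String, s.length ≤ n → s.Pairwise (· ≤ ·) →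
    pairsIn s = ((s.dedup.countP (fun r => decide (s.count r = 2)) : Nat) : Int) := by
  induction n with
  | zero =>
    intro s hlen _
    have hnil : s = [] := List.eq_nil_of_length_eq_zero (Nat.le_zero.mp hlen)
    subst hnil; simp [pairsIn]
  | succ n ihn =>
    intro s hlen hs
    cases s with
    | nil => simp [pairsIn]
    | cons a t =>
    have hpt : t.Pairwise (· ≤ ·) := hs.of_cons
    have hlt : t.length ≤ n := by simpa using hlen
    have hle : ∀ x ∈ t, a ≤ x := fun x hx => (List.pairwise_cons.mp hs).1 x hx
    set k0 := (t.takeWhile (· == a)).length with hk0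
    set rest0 := t.dropWhile (· == a) with hrest0
    have hdrop : t.drop k0 = rest0 := drop_len_takeWhile t _
    have hna : a ∉ rest0 := not_mem_dropWhile a t hpt hle
    have hrpw : rest0.Pairwise (· ≤ ·) := hpt.sublist (List.dropWhile_sublist _)
    have ih := ihn rest0 (le_trans (List.Sublist.length_le (List.dropWhile_sublist _)) hlt) hrpw
    have hct : ∀ x, t.count x = (if x = a then k0 else 0) + rest0.count x := by
      intro x
      conv_lhs => rw [← List.takeWhile_append_dropWhile (p := (· == a)) (l := t)]
      rw [List.count_append, count_takeWhile_beq]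
    have hmemt : ∀ x ∈ t, x = a ∨ x ∈ rest0 := by
      intro x hx
      have hx' : x ∈ t.takeWhile (· == a) ++ t.dropWhile (· == a) := by
        rw [List.takeWhile_append_dropWhile]; exact hx
      rcases List.mem_append.mp hx' with h | h
      · exact Or.inl (by simpa using List.mem_takeWhile_imp h)
      · exact Or.inr h
    have hsub : ∀ x ∈ rest0, x ∈ t := fun x hx => (List.dropWhile_sublist _).mem hx
    -- the distinct elements of a :: t are a and the distinct elements of the remainder
    have hnd : (a :: rest0.dedup).Nodup :=
      List.nodup_cons.mpr ⟨fun h => hna (List.mem_dedup.mp h), List.nodup_dedup _⟩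
    have hperm : (a :: t).dedup.Perm (a :: rest0.dedup) := by
      refine (List.perm_ext_iff_of_nodup (List.nodup_dedup _) hnd).mpr (fun x => ?_)
      rw [List.mem_dedup, List.mem_cons, List.mem_cons, List.mem_dedup]
      constructor
      · rintro (h | h)
        · exact Or.inl h
        · exact hmemt x h
      · rintro (h | h)
        · exact Or.inl h
        · exact Or.inr (hsub x h)
    -- counts in a :: t
    have hca : (a :: t).count a = k0 + 1 := by
      rw [List.count_cons_self, hct a, if_pos rfl, List.count_eq_zero.mpr hna]
    have hcx : ∀ x, x ≠ a → (a :: t).count x = rest0.count x := by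
      intro x hx
      rw [List.count_cons, hct x, if_neg hx, zero_add]
      simp [Ne.symm hx]
    -- assemble
    rw [pairsIn]
    rw [← hk0, hdrop]
    have hq : List.countP (fun r => decide (List.count r (a :: t) = 2)) rest0.dedup
        = List.countP (fun r => decide (List.count r rest0 = 2)) rest0.dedup :=
      List.countP_congr (fun x hxm => by
        rw [hcx x (fun h => hna (h ▸ List.mem_dedup.mp hxm))])
    rw [ih, hperm.countP_eq, List.countP_cons, hq, hca]
    by_cases h2 : k0 = 1
    · simp [h2, add_comm]
    · have hL : ¬ ((1 : Int) + (k0 : Nat) = 2) := by omega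
      have hR : ¬ (k0 + 1 = 2) := by omega
      simp [hL, hR]

-- the run-scan characterisation, stated for any sorted list
lemma pairsIn_sorted (s : List String) :
    s.Pairwise (· ≤ ·) →
    pairsIn s = ((s.dedup.countP (fun r => decide (s.count r = 2)) : Nat) : Int) :=
  pairsIn_sorted_aux s.length s le_rfl

-- B's value on the sorted ranks equals A's count over the distinct ranks
lemma pairsIn_sorted_ranks (l : List String) :
    pairsIn (PySem.List.sorted l (fun x => x))
      = (((PySem.Set.ofList l).countP (fun r => decide (l.count r = 2)) : Nat) : Int) := by
  have hperm : (PySem.List.sorted l (fun x => x)).Perm l := PySem.List.sorted_perm l _ _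
  rw [pairsIn_sorted _ (PySem.List.sorted_pairwise l (fun x => x))]
  congr 1
  have hmem : ∀ x, x ∈ (PySem.List.sorted l (fun x => x)).dedup ↔ x ∈ PySem.Set.ofList l := by
    intro x
    rw [List.mem_dedup, hperm.mem_iff, PySem.Set.mem_ofList]
  have hp : (PySem.List.sorted l (fun x => x)).dedup.Perm (PySem.Set.ofList l) :=
    (List.perm_ext_iff_of_nodup (List.nodup_dedup _) (PySem.Set.nodup_ofList l)).mpr hmem
  rw [hp.countP_eq]
  exact List.countP_congr (fun x _ => by rw [hperm.count_eq])

-- ===== VERDICT (by name: the statement is the Claim_ definition above) =====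
theorem onePair_spec : Claim_equal_onePair := by
  intro cards _
  unfold Spec_onePair onePair_alt
  dsimp only
  rw [onePair_eq_countP, pairsIn_sorted_ranks]
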